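-- pv_equiv track=rewrite | github.com/Apress/Quantum-Computing-Solutions | chapter12/quantum_annealer.py | verifyPick
-- ===== SOURCE A (Python) =====
-- def  verifyPick(pick_index,delivery_index, route):
--      picked = False
--      delivery_passed = False
--
--      for i in range(len(route)):
--          route_i = route[i]
--          if pick_index == route_i:
--             picked = True
--          if delivery_index == route_i and picked:
--             return True
--      return False
-- ===== SOURCE B (Python) =====
-- def verifyPick(pick_index, delivery_index, route):
--     if pick_index in route and delivery_index in route:
--         last_delivery = len(route) - 1 - route[::-1].index(delivery_index)
--         return route.index(pick_index) <= last_delivery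
--     return False
-- ===== Notes on version B (the rewrite author's own statement) =====
-- stated objective: alternative
-- what changed: Instead of A's single flag-carrying sweep with early return, B computes two positions - the first occurrence of pick_index and the last occurrence of delivery_index (via searching the reversed list) - and decides by the arithmetic comparison first_pick <= last_delivery.
import Mathlib
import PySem

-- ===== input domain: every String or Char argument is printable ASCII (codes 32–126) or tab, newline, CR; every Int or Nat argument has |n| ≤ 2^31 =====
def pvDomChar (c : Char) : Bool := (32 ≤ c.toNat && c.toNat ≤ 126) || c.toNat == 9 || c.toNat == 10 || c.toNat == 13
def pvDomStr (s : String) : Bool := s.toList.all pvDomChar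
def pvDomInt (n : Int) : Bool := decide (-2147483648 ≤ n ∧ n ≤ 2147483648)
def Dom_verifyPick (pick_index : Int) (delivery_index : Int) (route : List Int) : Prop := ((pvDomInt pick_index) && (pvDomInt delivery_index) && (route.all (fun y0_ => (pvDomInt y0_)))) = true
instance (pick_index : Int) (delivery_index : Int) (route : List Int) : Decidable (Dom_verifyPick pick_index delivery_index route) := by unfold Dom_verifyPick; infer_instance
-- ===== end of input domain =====

-- B replaces A's flag sweep by comparing first-pick position with last-delivery position (objective: alternative).
-- ===== PORT A =====
-- A's for-loop over route carrying the 'picked' flag (A's 'delivery_passed' is never read and is dropped).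
def verifyPickLoopA (pick_index delivery_index : Int) (picked : Bool) : List Int → Bool
  | [] => false
  | x :: xs =>
    let picked' := picked || decide (pick_index = x)
    if decide (delivery_index = x) && picked' then true
    else verifyPickLoopA pick_index delivery_index picked' xs

def verifyPick (pick_index : Int) (delivery_index : Int) (route : List Int) : Bool :=
  verifyPickLoopA pick_index delivery_index false route

-- ===== PORT B =====
-- B: both values present, then compare first pick position with last delivery position,
-- where route[::-1] is ported as route.reverse (PySem.List.slice?_none_none_neg_one).
def verifyPick_alt (pick_index : Int) (delivery_index : Int) (route : List Int) : Bool :=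
  if route.contains pick_index && route.contains delivery_index then
    match PySem.List.index? route.reverse delivery_index with
    | none => false  -- unreachable: delivery_index ∈ route
    | some rj =>
      match PySem.List.index? route pick_index with
      | none => false  -- unreachable: pick_index ∈ route
      | some pi => decide ((pi : Int) ≤ (route.length : Int) - 1 - (rj : Int))
  else false

-- ===== PRECONDITION & SPEC =====
def Spec_verifyPick (pick_index : Int) (delivery_index : Int) (route : List Int) (out : Bool) : Prop := out = verifyPick_alt pick_index delivery_index route
instance (pick_index : Int) (delivery_index : Int) (route : List Int) (out : Bool) : Decidable (Spec_verifyPick pick_index delivery_index route out) := by unfold Spec_verifyPick; infer_instance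

-- ===== CLAIM =====
def Claim_equal_verifyPick : Prop := ∀ (pick_index : Int) (delivery_index : Int) (route : List Int), Dom_verifyPick pick_index delivery_index route → Spec_verifyPick pick_index delivery_index route (verifyPick pick_index delivery_index route)

-- ===== LEMMAS AND PROOFS =====
-- Proof-side intermediate form of A: anchor at the first pick, test the suffix.
def anchorForm (pick_index delivery_index : Int) (route : List Int) : Bool :=
  match PySem.List.index? route pick_index with
  | none => false
  | some pi => (route.drop pi).contains delivery_index

theorem verifyPickLoopA_true (p d : Int) (xs : List Int) :
    verifyPickLoopA p d true xs = xs.contains d := by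
  induction xs with
  | nil => rfl
  | cons x xs ih =>
    rw [verifyPickLoopA]
    simp only [Bool.true_or, Bool.and_true, List.contains_cons]
    by_cases h : d = x
    · simp [h]
    · simp [h, ih]

theorem verifyPick_eq_anchor (p d : Int) (route : List Int) :
    verifyPick p d route = anchorForm p d route := by
  unfold verifyPick
  induction route with
  | nil => rfl
  | cons x xs ih =>
    rw [verifyPickLoopA]
    by_cases hp : p = x
    · subst hp
      rw [anchorForm, PySem.List.index?_cons_self]
      simp only [Bool.false_or, List.drop_zero, List.contains_cons]
      by_cases h : d = p
      · simp [h]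
      · simp [h, verifyPickLoopA_true]
    · have : (decide (d = x) && (false || decide (p = x))) = false := by simp [hp]
      simp only [Bool.false_or] at this ⊢
      rw [this, if_neg (by simp), decide_eq_false hp]
      rw [ih]
      unfold anchorForm
      rw [PySem.List.index?_cons_of_ne _ (fun h => hp h.symm)]
      cases hidx : PySem.List.index? xs p with
      | none => simp
      | some pi => simp [List.drop_succ_cons]

-- d ∈ (l ++ d :: t).drop pi  iff  pi ≤ l.length, provided d ∉ t.
theorem drop_contains_last (d : Int) (l t : List Int) (hd : d ∉ t) (pi : Nat) :
    ((l ++ d :: t).drop pi).contains d = decide (pi ≤ l.length) := by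
  by_cases h : pi ≤ l.length
  · have h0 : (l ++ d :: t).drop pi = l.drop pi ++ d :: t := by
      rw [List.drop_append]
      have : pi - l.length = 0 := by omega
      rw [this, List.drop_zero]
    rw [h0]
    simp [h]
  · obtain ⟨k, hk⟩ : ∃ k, pi - l.length = k + 1 := ⟨pi - l.length - 1, by omega⟩
    have hnil : l.drop pi = [] := List.drop_eq_nil_of_le (by omega)
    rw [List.drop_append, hk, List.drop_succ_cons, hnil, List.nil_append]
    have hnd : d ∉ t.drop k := fun hm => hd (List.mem_of_mem_drop hm)
    simp [h, hnd]

theorem anchor_eq_alt (p d : Int) (route : List Int) :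
    anchorForm p d route = verifyPick_alt p d route := by
  simp only [anchorForm, verifyPick_alt, PySem.List.index?_eq_idxOf?]
  by_cases hpmem : p ∈ route
  case neg =>
    have hn : List.idxOf? p route = none := by
      rw [← PySem.List.index?_eq_idxOf?]
      exact (PySem.List.index?_eq_none_iff _ _).mpr hpmem
    simp [hn, hpmem]
  case pos =>
    obtain ⟨pi, hpi⟩ := Option.isSome_iff_exists.mp ((PySem.List.index?_isSome_iff _ _).mpr hpmem)
    rw [PySem.List.index?_eq_idxOf?] at hpi
    rw [hpi]
    by_cases hdmem : d ∈ route
    case neg =>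
      have hnd : d ∉ route.drop pi := fun hm => hdmem (List.mem_of_mem_drop hm)
      simp [hdmem, hnd]
    case pos =>
      have hdrev : d ∈ route.reverse := List.mem_reverse.mpr hdmem
      obtain ⟨rj, hrj⟩ := Option.isSome_iff_exists.mp
        ((PySem.List.index?_isSome_iff _ _).mpr hdrev)
      have hrj' := hrj
      rw [PySem.List.index?_eq_idxOf?] at hrj'
      have hcpd : (route.contains p && route.contains d) = true := by simp [hpmem, hdmem]
      rw [hcpd, if_pos rfl, hrj']
      -- decompose route around its LAST occurrence of d
      obtain ⟨pre, suf, hsplit, hlen, hdpre⟩ := (PySem.List.index?_eq_some_iff _ _ _).mp hrj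
      have hroute : route = suf.reverse ++ d :: pre.reverse := by
        have := congrArg List.reverse hsplit
        simpa [List.reverse_append] using this
      have hdpre' : d ∉ pre.reverse := fun hm => hdpre (List.mem_reverse.mp hm)
      rw [hroute]
      show ((suf.reverse ++ d :: pre.reverse).drop pi).contains d
          = decide ((pi : Int) ≤ ((suf.reverse ++ d :: pre.reverse).length : Int) - 1 - (rj : Int))
      rw [drop_contains_last d _ _ hdpre' pi]
      simp only [List.length_append, List.length_cons, List.length_reverse, decide_eq_decide]
      omega

-- ===== VERDICT =====
theorem verifyPick_spec : Claim_equal_verifyPick := by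
  intro p d route _
  unfold Spec_verifyPick
  rw [verifyPick_eq_anchor, anchor_eq_alt]
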